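-- pv_equiv track=rewrite | github.com/avickars/mosscanvasgui | moss/courses/CMPT310_D100_Artificial_Intelligence_Survey/Assignment_1/submissions/Yixuan_Lu/a1.py | check_solvability
-- ===== SOURCE A (Python) =====
-- def check_solvability(state):
--     """ Checks if the given state is solvable """
--     # since I dont know how to check solvability for all random duckpuzzle, I only check puzzle with particular cases
--     # let first four tiles 0,1,2,3 be in state 0 to 3 and goal is state[0]=1, state[1]=2, state[2]=3, state[3]=0
--     # Then we can focus on the remaining 2*3 gameboard with 4 to 8 and 0, if 2*2 is solvable
--     #-----------------------------------
--     # checking 2*2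
--
--     if state[0]+state[1]+state[2]+state[3]!=6:
--         return False
--
--     flag=False
--     if state[0]==1:
--         if state[1]==2 and state[2]==3:
--             flag=True
--         elif state[1]==0 and state[2]==3:
--             flag=True
--
--     elif state[0]==2:
--         if state[1]==3 and state[2]==1:
--             flag=True
--         elif state[1]==3 and state[2]==1:
--             flag=True
--         elif state[1]==0 and state[2]==1:
--             flag=True
--
--     elif state[0]==3:
--         if state[1]==1 and state[2]==2:
--             flag=True
--         elif state[1]==1 and state[2]==0:
--             flag=True
--         elif state[1]==0 and state[2]==2:
--             flag=True
--
--
--     elif state[0]==0: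
--         if state[1]==1 and state[2]==3:
--             flag=True
--         elif state[1]==3 and state[2]==2:
--             flag=True
--         elif state[1]==2 and state[2]==1:
--             flag=True
--
--
--     if flag==False:
--         return False
--     '''
--     inversion_f = 0
--     for i in range(4):
--         for j in range(i + 1, len(state)):
--             if (state[i] > state[j]) and state[i] != 0 and state[j] != 0:
--                 inversion_f += 1
--     if inversion_f % 2==1:
--         return False
--     '''
--     # checking 2*3
--     inversion_s = 0
--     for i in range(3,len(state)):
--         for j in range(i + 1, len(state)):
--             if (state[i] > state[j]) and state[i] != 0 and state[j] != 0:
--                 inversion_s += 1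
--     return inversion_s % 2==0
-- ===== SOURCE B (Python) =====
-- VALID = {(1, 2, 3), (1, 0, 3),
--          (2, 3, 1), (2, 0, 1),
--          (3, 1, 2), (3, 1, 0), (3, 0, 2),
--          (0, 1, 3), (0, 3, 2), (0, 2, 1)}
--
--
-- def _sort_count(a):
--     """Merge sort returning (sorted list, number of inversions of a)."""
--     if len(a) <= 1:
--         return a, 0
--     mid = len(a) // 2
--     l, cl = _sort_count(a[:mid])
--     r, cr = _sort_count(a[mid:])
--     merged = []
--     inv = cl + cr
--     i = j = 0
--     while i < len(l) and j < len(r):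
--         if l[i] <= r[j]:
--             merged.append(l[i])
--             i += 1
--         else:
--             inv += len(l) - i
--             merged.append(r[j])
--             j += 1
--     merged.extend(l[i:])
--     merged.extend(r[j:])
--     return merged, inv
--
--
-- def check_solvability(state):
--     """ Checks if the given state is solvable """
--     if state[0] + state[1] + state[2] + state[3] != 6:
--         return False
--     if (state[0], state[1], state[2]) not in VALID:
--         return False
--     tiles = [x for x in state[3:] if x != 0]
--     _, inv = _sort_count(tiles)
--     return inv % 2 == 0
-- ===== Notes on version B (the rewrite author's own statement) =====
-- stated objective: alternative
-- what changed: The 25-line if/elif cascade over state[0..2] becomes membership of the triple in a precomputed set VALID, and the quadratic index-pair double loop counting inversions is replaced by filtering the zeros out of state[3:] and counting inversions by divide-and-conquer merge sort (count cross pairs while merging), taking the parity of that count.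
-- outside the precondition, e.g. on check_solvability([1, 2, 3]): A raises IndexError, B raises IndexError
import Mathlib
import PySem

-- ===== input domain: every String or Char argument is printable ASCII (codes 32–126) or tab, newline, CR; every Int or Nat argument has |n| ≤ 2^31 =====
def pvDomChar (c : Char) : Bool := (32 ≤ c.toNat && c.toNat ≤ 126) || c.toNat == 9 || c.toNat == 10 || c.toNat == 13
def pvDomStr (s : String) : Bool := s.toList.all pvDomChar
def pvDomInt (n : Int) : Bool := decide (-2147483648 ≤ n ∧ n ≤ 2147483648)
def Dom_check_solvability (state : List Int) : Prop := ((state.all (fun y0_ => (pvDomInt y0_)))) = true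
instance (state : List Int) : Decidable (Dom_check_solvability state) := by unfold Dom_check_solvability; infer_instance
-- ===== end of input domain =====

-- B replaces the if/elif cascade by a lookup in a precomputed set of allowed triples, and counts
-- the inversion parity of the zero-filtered tail by divide-and-conquer merge sort instead of
-- A's quadratic index-pair double loop (objective: alternative algorithm).

-- ===== PORT A =====
def check_solvability (state : List Int) : Bool :=
  -- state[0]..state[3]: in-range under Pre_ (4 ≤ length); pyGetD is exact there
  let s0 := PySem.List.pyGetD state 0 0
  let s1 := PySem.List.pyGetD state 1 0
  let s2 := PySem.List.pyGetD state 2 0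
  let s3 := PySem.List.pyGetD state 3 0
  if s0 + s1 + s2 + s3 ≠ 6 then false
  else
    let flag :=
      if s0 = 1 then
        if s1 = 2 ∧ s2 = 3 then true
        else if s1 = 0 ∧ s2 = 3 then true
        else false
      else if s0 = 2 then
        if s1 = 3 ∧ s2 = 1 then true
        else if s1 = 3 ∧ s2 = 1 then true
        else if s1 = 0 ∧ s2 = 1 then true
        else false
      else if s0 = 3 then
        if s1 = 1 ∧ s2 = 2 then true
        else if s1 = 1 ∧ s2 = 0 then true
        else if s1 = 0 ∧ s2 = 2 then true
        else false
      else if s0 = 0 then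
        if s1 = 1 ∧ s2 = 3 then true
        else if s1 = 3 ∧ s2 = 2 then true
        else if s1 = 2 ∧ s2 = 1 then true
        else false
      else false
    if flag = false then false
    else
      -- inversion_s: double index loop over range(3, len) × range(i+1, len)
      decide (PySem.Int.mod
        ((PySem.List.pyRange 3 (PySem.List.len state) 1).foldl (fun acc i =>
          (PySem.List.pyRange (i + 1) (PySem.List.len state) 1).foldl (fun acc2 j =>
            if PySem.List.pyGetD state i 0 > PySem.List.pyGetD state j 0 ∧
               PySem.List.pyGetD state i 0 ≠ 0 ∧ PySem.List.pyGetD state j 0 ≠ 0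
            then acc2 + 1 else acc2) acc) 0) 2 = 0)

-- ===== PORT B =====
def VALID : List (Int × Int × Int) :=
  [(1, 2, 3), (1, 0, 3), (2, 3, 1), (2, 0, 1), (3, 1, 2), (3, 1, 0), (3, 0, 2),
   (0, 1, 3), (0, 3, 2), (0, 2, 1)]

-- the merge while-loop of _sort_count: indices i,j into l,r become the remaining suffixes;
-- 'inv += len(l) - i' is the length of the remaining left suffix
def scMerge : List Int → List Int → Nat → List Int × Nat
  | [], r, c => (r, c)
  | x :: l, [], c => (x :: l, c)
  | x :: l, y :: r, c =>
    if x ≤ y then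
      let m := scMerge l (y :: r) c
      (x :: m.1, m.2)
    else
      let m := scMerge (x :: l) r (c + (l.length + 1))
      (y :: m.1, m.2)

-- _sort_count: merge sort returning (sorted list, inversion count)
def scSort (a : List Int) : List Int × Nat :=
  if h : a.length ≤ 1 then (a, 0)
  else
    let L := scSort (a.take (a.length / 2))
    let R := scSort (a.drop (a.length / 2))
    let M := scMerge L.1 R.1 (L.2 + R.2)
    (M.1, M.2)
termination_by a.length
decreasing_by
  · simp [List.length_take]; omega
  · simp [List.length_drop]; omega

def check_solvability_alt (state : List Int) : Bool :=
  let s0 := PySem.List.pyGetD state 0 0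
  let s1 := PySem.List.pyGetD state 1 0
  let s2 := PySem.List.pyGetD state 2 0
  let s3 := PySem.List.pyGetD state 3 0
  if s0 + s1 + s2 + s3 ≠ 6 then false
  else if ¬ (s0, s1, s2) ∈ VALID then false
  else
    let tiles := (PySem.List.slice state (some 3) none).filter (fun x => decide (x ≠ 0))
    decide ((scSort tiles).2 % 2 = 0)

-- ===== PRECONDITION & SPEC =====
-- A indexes state[0..3] unconditionally: it raises IndexError iff the list has fewer than 4 elements.
def Pre_check_solvability (state : List Int) : Prop := 4 ≤ state.length
instance (state : List Int) : Decidable (Pre_check_solvability state) := by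
  unfold Pre_check_solvability; infer_instance
def pvWitness_check_solvability : List Int := [1, 2, 3, 0, 4, 5, 6, 7, 8]

def Spec_check_solvability (state : List Int) (out : Bool) : Prop := out = check_solvability_alt state
instance (state : List Int) (out : Bool) : Decidable (Spec_check_solvability state out) := by
  unfold Spec_check_solvability; infer_instance

-- ===== CLAIM (what is proved, stated in full; the proofs are below) =====
def Claim_equal_check_solvability : Prop := ∀ (state : List Int), Dom_check_solvability state → Pre_check_solvability state → Spec_check_solvability state (check_solvability state)

-- ===== LEMMAS AND PROOFS =====

-- the inversion predicate of A, seen from the earlier element x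
def cntP (x y : Int) : Bool := decide (y < x ∧ x ≠ 0 ∧ y ≠ 0)

-- A's inversion count, structurally
def Dn : List Int → Nat
  | [] => 0
  | x :: xs => xs.countP (cntP x) + Dn xs

-- plain inversion count (no zero conditions)
def invCnt : List Int → Nat
  | [] => 0
  | x :: xs => xs.countP (fun y => decide (y < x)) + invCnt xs

-- number of inverted cross pairs (x from l, y from r, y < x)
def cross (l r : List Int) : Nat := (l.map (fun x => r.countP (fun y => decide (y < x)))).sum

theorem inv_append (l r : List Int) : invCnt (l ++ r) = invCnt l + invCnt r + cross l r := by
  induction l with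
  | nil => simp [invCnt, cross]
  | cons x xs ih =>
    simp only [List.cons_append, invCnt, List.countP_append, cross, List.map_cons, List.sum_cons]
    rw [ih]
    simp [cross]
    ring

theorem cross_perm_left {l l' : List Int} (r : List Int) (h : l.Perm l') :
    cross l r = cross l' r :=
  List.Perm.sum_eq (h.map _)

theorem cross_perm_right (l : List Int) {r r' : List Int} (h : r.Perm r') :
    cross l r = cross l r' := by
  unfold cross
  congr 1
  apply List.map_congr_left
  intro x _
  exact h.countP_eq _

theorem cross_cons_right (l : List Int) (y : Int) (r : List Int) :
    cross l (y :: r) = l.countP (fun z => decide (y < z)) + cross l r := by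
  induction l with
  | nil => simp [cross]
  | cons x xs ih =>
    simp only [cross, List.map_cons, List.sum_cons, List.countP_cons] at *
    rw [ih]
    by_cases h : y < x <;> simp [h] <;> ring

theorem scMerge_spec : ∀ (n : Nat) (l r : List Int) (c : Nat),
    l.length + r.length ≤ n →
    l.Pairwise (· ≤ ·) → r.Pairwise (· ≤ ·) →
    (scMerge l r c).1.Perm (l ++ r) ∧ (scMerge l r c).1.Pairwise (· ≤ ·)
      ∧ (scMerge l r c).2 = c + cross l r := by
  intro n
  induction n with
  | zero =>
    intro l r c hn hl hr
    have h1 : l = [] := by cases l <;> simp_all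
    have h2 : r = [] := by cases r <;> simp_all
    subst h1; subst h2
    simp [scMerge, cross]
  | succ n ih =>
    intro l r c hn hl hr
    match l, r with
    | [], r => simpa [scMerge, cross] using hr
    | x :: l, [] =>
      refine ⟨by simp [scMerge], by simpa [scMerge] using hl, ?_⟩
      simp [scMerge, cross]
    | x :: l, y :: r =>
      obtain ⟨hx, hl'⟩ := List.pairwise_cons.mp hl
      obtain ⟨hy, hr'⟩ := List.pairwise_cons.mp hr
      by_cases hxy : x ≤ y
      · simp only [scMerge, if_pos hxy]
        obtain ⟨hp, hs, hc⟩ := ih l (y :: r) c (by simp at hn ⊢; omega) hl' hr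
        refine ⟨hp.cons x, ?_, ?_⟩
        · rw [List.pairwise_cons]
          refine ⟨?_, hs⟩
          intro b hb
          rcases List.mem_append.mp (hp.mem_iff.mp hb) with h | h
          · exact hx b h
          · rcases List.mem_cons.mp h with rfl | h
            · exact hxy
            · exact le_trans hxy (hy b h)
        · rw [hc]
          have h0 : (y :: r).countP (fun z => decide (z < x)) = 0 := by
            rw [List.countP_eq_zero]
            intro z hz
            rcases List.mem_cons.mp hz with rfl | h
            · simp; omega
            · have := hy z h
              simp; omega
          have hcr : cross (x :: l) (y :: r)
              = (y :: r).countP (fun z => decide (z < x)) + cross l (y :: r) := by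
            simp [cross]
          rw [hcr, h0]
          omega
      · have hyx : y < x := by omega
        simp only [scMerge, if_neg hxy]
        obtain ⟨hp, hs, hc⟩ := ih (x :: l) r (c + (l.length + 1)) (by simp at hn ⊢; omega) hl hr'
        refine ⟨?_, ?_, ?_⟩
        · exact (hp.cons y).trans (List.perm_middle (a := y) (l₁ := x :: l) (l₂ := r)).symm
        · rw [List.pairwise_cons]
          refine ⟨?_, hs⟩
          intro b hb
          rcases List.mem_append.mp (hp.mem_iff.mp hb) with h | h
          · rcases List.mem_cons.mp h with rfl | h
            · omega
            · have := hx b h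
              omega
          · exact hy b h
        · rw [hc, cross_cons_right]
          have hall : (x :: l).countP (fun z => decide (y < z)) = (x :: l).length := by
            rw [List.countP_eq_length]
            intro z hz
            rcases List.mem_cons.mp hz with rfl | h
            · simp; omega
            · have := hx z h
              simp; omega
          rw [hall]
          simp
          omega

theorem scSort_spec (a : List Int) :
    (scSort a).1.Perm a ∧ (scSort a).1.Pairwise (· ≤ ·) ∧ (scSort a).2 = invCnt a := by
  by_cases h : a.length ≤ 1
  · rcases a with _ | ⟨x, _ | ⟨y, t⟩⟩
    · simp [scSort, invCnt]
    · simp [scSort, invCnt]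
    · simp at h
  · rw [scSort]
    simp only [dif_neg h]
    obtain ⟨Lp, Ls, Lc⟩ := scSort_spec (a.take (a.length / 2))
    obtain ⟨Rp, Rs, Rc⟩ := scSort_spec (a.drop (a.length / 2))
    obtain ⟨Mp, Ms, Mc⟩ := scMerge_spec
      ((scSort (a.take (a.length / 2))).1.length + (scSort (a.drop (a.length / 2))).1.length)
      (scSort (a.take (a.length / 2))).1
      (scSort (a.drop (a.length / 2))).1
      ((scSort (a.take (a.length / 2))).2 + (scSort (a.drop (a.length / 2))).2)
      (le_refl _) Ls Rs
    refine ⟨?_, Ms, ?_⟩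
    · have hpp := Lp.append Rp
      rw [List.take_append_drop] at hpp
      exact Mp.trans hpp
    · rw [Mc, Lc, Rc]
      have ha : invCnt a = invCnt (a.take (a.length / 2) ++ a.drop (a.length / 2)) := by
        rw [List.take_append_drop]
      rw [ha, inv_append]
      rw [cross_perm_left _ Lp.symm, cross_perm_right _ Rp.symm]
termination_by a.length
decreasing_by
  · simp [List.length_take]; omega
  · simp [List.length_drop]; omega

-- A's zero-guarded count equals the plain count on the zero-filtered list
theorem Dn_eq_invCnt_filter (l : List Int) :
    Dn l = invCnt (l.filter (fun x => decide (x ≠ 0))) := by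
  induction l with
  | nil => simp [Dn, invCnt]
  | cons x xs ih =>
    by_cases hx : x = 0
    · simp only [Dn, hx]
      have : List.countP (cntP 0) xs = 0 := by
        rw [List.countP_eq_zero]
        intro z _
        simp [cntP]
      simp [this, ih]
    · have hfc : (x :: xs).filter (fun z => decide (z ≠ 0))
          = x :: xs.filter (fun z => decide (z ≠ 0)) := by
        simp [hx]
      simp only [Dn, hfc, invCnt]
      rw [List.countP_filter, ih]
      congr 1
      apply List.countP_congr
      intro y _
      simp only [cntP, Bool.and_eq_true, decide_eq_true_eq, ne_eq, decide_not,
        Bool.not_eq_true', decide_eq_false_iff_not]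
      constructor
      · rintro ⟨h1, _, h2⟩; exact ⟨h1, h2⟩
      · rintro ⟨h1, h2⟩; exact ⟨h1, hx, h2⟩

-- inner+outer index loops of A equal the structural pair count of the dropped suffix
theorem outer_loop (state : List Int) (k : Nat) :
    ∀ (i : Int), 0 ≤ i → state.length - i.toNat = k → ∀ (c : Int),
    (PySem.List.pyRange i (PySem.List.len state) 1).foldl (fun acc i =>
          (PySem.List.pyRange (i + 1) (PySem.List.len state) 1).foldl (fun acc2 j =>
            if PySem.List.pyGetD state i 0 > PySem.List.pyGetD state j 0 ∧
               PySem.List.pyGetD state i 0 ≠ 0 ∧ PySem.List.pyGetD state j 0 ≠ 0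
            then acc2 + 1 else acc2) acc) c
      = c + (Dn (state.drop i.toNat) : Int) := by
  induction k with
  | zero =>
    intro i hi hk c
    have hlen : (state.length : Int) ≤ i := by omega
    rw [PySem.List.pyRange_one_eq_nil (by simpa using hlen)]
    have : state.drop i.toNat = [] := List.drop_eq_nil_of_le (by omega)
    simp [this, Dn]
  | succ k ih =>
    intro i hi hk c
    have hlt : i < (state.length : Int) := by omega
    have hnat : i.toNat < state.length := by omega
    rw [PySem.List.pyRange_one_cons (by simpa using hlt)]
    rw [List.foldl_cons]
    have hdrop : state.drop i.toNat = state[i.toNat] :: state.drop (i.toNat + 1) :=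
      List.drop_eq_getElem_cons hnat
    have hinner : ∀ c' : Int,
        (PySem.List.pyRange (i + 1) (PySem.List.len state) 1).foldl (fun acc2 j =>
            if PySem.List.pyGetD state i 0 > PySem.List.pyGetD state j 0 ∧
               PySem.List.pyGetD state i 0 ≠ 0 ∧ PySem.List.pyGetD state j 0 ≠ 0
            then acc2 + 1 else acc2) c'
          = c' + ((state.drop (i + 1).toNat).countP (cntP (PySem.List.pyGetD state i 0)) : Int) := by
      intro c'
      have hrw := PySem.List.foldl_pyRange_pyGetD (a := i + 1) (xs := state) (d := (0 : Int))
        (f := fun acc2 y =>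
          if PySem.List.pyGetD state i 0 > y ∧ PySem.List.pyGetD state i 0 ≠ 0 ∧ y ≠ 0
          then acc2 + 1 else acc2) (init := c') (by omega)
      rw [hrw]
      have hfun : (fun (acc2 : Int) (y : Int) =>
          if PySem.List.pyGetD state i 0 > y ∧ PySem.List.pyGetD state i 0 ≠ 0 ∧ y ≠ 0
          then acc2 + 1 else acc2)
          = fun acc2 y => if (cntP (PySem.List.pyGetD state i 0) y) = true then acc2 + 1 else acc2 := by
        funext acc2 y
        simp [cntP]
      rw [hfun, PySem.List.foldl_count_if]
    rw [hinner c]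
    have h1 : (i + 1).toNat = i.toNat + 1 := by omega
    rw [ih (i + 1) (by omega) (by omega)]
    have hget : PySem.List.pyGetD state i 0 = state[i.toNat] :=
      PySem.List.pyGetD_eq_getElem state 0 hi (by simpa using hlt)
    rw [hdrop]
    simp only [Dn, h1, hget]
    push_cast
    ring

-- A's branch cascade accepts exactly the triples of VALID
theorem flag_eq (s0 s1 s2 : Int) :
    (if s0 = 1 then
        if s1 = 2 ∧ s2 = 3 then true
        else if s1 = 0 ∧ s2 = 3 then true
        else false
      else if s0 = 2 then
        if s1 = 3 ∧ s2 = 1 then true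
        else if s1 = 3 ∧ s2 = 1 then true
        else if s1 = 0 ∧ s2 = 1 then true
        else false
      else if s0 = 3 then
        if s1 = 1 ∧ s2 = 2 then true
        else if s1 = 1 ∧ s2 = 0 then true
        else if s1 = 0 ∧ s2 = 2 then true
        else false
      else if s0 = 0 then
        if s1 = 1 ∧ s2 = 3 then true
        else if s1 = 3 ∧ s2 = 2 then true
        else if s1 = 2 ∧ s2 = 1 then true
        else false
      else false)
      = decide ((s0, s1, s2) ∈ VALID) := by
  simp only [VALID, List.mem_cons, List.not_mem_nil, or_false, Prod.mk.injEq]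
  split_ifs <;> simp_all

-- ===== VERDICT =====
theorem check_solvability_spec : Claim_equal_check_solvability := by
  intro state _ hpre
  unfold Pre_check_solvability at hpre
  unfold Spec_check_solvability check_solvability check_solvability_alt
  by_cases hsum : PySem.List.pyGetD state 0 0 + PySem.List.pyGetD state 1 0 +
      PySem.List.pyGetD state 2 0 + PySem.List.pyGetD state 3 0 ≠ 6
  · rw [if_pos hsum, if_pos hsum]
  · rw [if_neg hsum, if_neg hsum, flag_eq]
    by_cases hmem : (PySem.List.pyGetD state 0 0, PySem.List.pyGetD state 1 0,
        PySem.List.pyGetD state 2 0) ∈ VALID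
    · rw [if_neg (by simp [hmem]), if_neg (by simp [hmem])]
      rw [outer_loop state (state.length - 3) 3 (by omega) (by omega) 0]
      rw [PySem.List.slice_from state (a := 3) (by omega)]
      have h3 : (3 : Int).toNat = 3 := rfl
      rw [h3]
      obtain ⟨_, _, hc⟩ := scSort_spec ((state.drop 3).filter (fun x => decide (x ≠ 0)))
      simp only [hc, ← Dn_eq_invCnt_filter]
      rw [PySem.Int.mod_eq_emod_of_pos (by omega)]
      simp only [decide_eq_decide]
      omega
    · rw [if_pos (by simp [hmem]), if_pos (by simp [hmem])]
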